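-- pv_equiv track=rewrite | github.com/Yosseulsin-JOB/algorithm-study-20.08 | 1차/류동준_크레인.py | solution
-- ===== SOURCE A (Python) =====
-- def get_doll(board,moves):
--     hash = {mov-1 :0 for mov in moves}
--     for move in moves:
--         for row in range(hash[move-1],len(board)):
--             if board[row][move-1] != 0:
--                 hash[move-1] = row +1
--                 yield board[row][move-1]
--                 break
--
-- def solution(board,moves):
--     answer = 0
--     stack = []
--     for doll in get_doll(board,moves):
--         if stack and stack[-1] == doll:
--             stack.pop()
--             answer = answer + 2
--         else:
--             stack.append(doll)
--     return answer
-- ===== SOURCE B (Python) =====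
-- def solution(board, moves):
--     # Preprocess: materialize, for each distinct column referenced by moves,
--     # the list of its nonzero dolls scanned top-to-bottom; then a flat move
--     # loop pops via an index pointer and pair-cancels on a stack.
--     cols = {m: [row[m - 1] for row in board if row[m - 1] != 0]
--             for m in dict.fromkeys(moves)}
--     ptr = dict.fromkeys(cols, 0)
--     answer = 0
--     stack = []
--     for m in moves:
--         col = cols[m]
--         i = ptr[m]
--         if i < len(col):
--             ptr[m] = i + 1
--             doll = col[i]
--             if stack and stack[-1] == doll:
--                 stack.pop()
--                 answer += 2
--             else:
--                 stack.append(doll)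
--     return answer
-- ===== Notes on version B (the rewrite author's own statement) =====
-- stated objective: alternative
-- what changed: Replaces A's lazy generator with per-column resume pointers into the 2-D board by an explicit preprocessing pass that materializes each referenced column's nonzero dolls as a list once, then a flat move loop that pops by index and pair-cancels on the stack.
-- outside the precondition, e.g. on solution([[0, 3], [5]], [2]): A returns 0, B raises IndexError
import Mathlib
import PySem

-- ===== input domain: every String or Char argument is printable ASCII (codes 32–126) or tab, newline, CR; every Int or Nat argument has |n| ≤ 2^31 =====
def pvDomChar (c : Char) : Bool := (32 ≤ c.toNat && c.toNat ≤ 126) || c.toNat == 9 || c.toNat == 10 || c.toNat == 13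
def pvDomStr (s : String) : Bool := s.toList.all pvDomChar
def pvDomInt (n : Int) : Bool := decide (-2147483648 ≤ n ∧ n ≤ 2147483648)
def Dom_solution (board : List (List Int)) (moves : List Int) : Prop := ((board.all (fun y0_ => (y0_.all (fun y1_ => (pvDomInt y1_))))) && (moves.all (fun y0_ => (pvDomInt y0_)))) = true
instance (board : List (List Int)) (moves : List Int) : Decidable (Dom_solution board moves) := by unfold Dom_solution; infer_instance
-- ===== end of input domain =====

-- B replaces A's lazy generator (per-column resume pointers scanning the 2-D board) by a
-- preprocessing pass materializing each referenced column's nonzero dolls, then a flat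
-- move loop with index pointers feeding the same stack pair-cancellation (alternative).


-- ===== PORT A =====
-- inner loop of get_doll: for row in range(start, len(board)): if board[row][move-1] != 0: update, yield, break
-- (an out-of-range board[row][move-1] is an IndexError in Python; pyGet? = none there, outside Pre_)
def pvScan (board : List (List Int)) (c : Int) (rows : List Int) : Option (Int × Int) :=
  match rows with
  | [] => none
  | r :: rest =>
    match (PySem.List.pyGet? board r).bind (fun row => PySem.List.pyGet? row c) with
    | none => none
    | some v => if v ≠ 0 then some (r + 1, v) else pvScan board c rest

-- the generator's outer loop over moves: state = (hash, dolls yielded so far)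
def pvAFold (board : List (List Int)) (moves : List Int)
    (st : PySem.Dict Int Int × List Int) : PySem.Dict Int Int × List Int :=
  moves.foldl (fun st move =>
    match pvScan board (move - 1)
        (PySem.List.pyRange (st.1.getD (move - 1) 0) (board.length : Int) 1) with
    | none => st
    | some (r1, v) => (st.1.insert (move - 1) r1, st.2 ++ [v])) st

-- get_doll consumed as a list; hash = {mov-1: 0 for mov in moves}
def pvGetDoll (board : List (List Int)) (moves : List Int) : List Int :=
  (pvAFold board moves
    (moves.foldl (fun d mov => d.insert (mov - 1) 0) PySem.Dict.empty, [])).2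

-- the consumer's stack logic; the stack's top (Python stack[-1]) is the list HEAD here
def pvStackStep (st : Int × List Int) (doll : Int) : Int × List Int :=
  match st.2 with
  | top :: rest => if top = doll then (st.1 + 2, rest) else (st.1, doll :: top :: rest)
  | [] => (st.1, [doll])

def solution (board : List (List Int)) (moves : List Int) : Int :=
  ((pvGetDoll board moves).foldl pvStackStep (0, [])).1

-- ===== PORT B =====
-- [row[m-1] for row in board if row[m-1] != 0]
def pvColOf (board : List (List Int)) (m : Int) : List Int :=
  board.filterMap (fun row =>
    match PySem.List.pyGet? row (m - 1) with
    | some v => if v ≠ 0 then some v else none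
    | none => none)

-- cols = {m: [...] for m in dict.fromkeys(moves)}  (dict.fromkeys = ordered dedup)
def pvBuildCols (board : List (List Int)) (moves : List Int) : PySem.Dict Int (List Int) :=
  (PySem.List.dedup moves).foldl (fun d m => d.insert m (pvColOf board m)) PySem.Dict.empty

-- body of B's move loop; state = (ptr, answer, stack); stack top at list head
def pvBStep (cols : PySem.Dict Int (List Int))
    (st : PySem.Dict Int Int × Int × List Int) (m : Int) :
    PySem.Dict Int Int × Int × List Int :=
  let col := cols.getD m []
  let i := st.1.getD m 0
  if i < (col.length : Int) then
    let doll := PySem.List.pyGetD col i 0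
    let ptr' := st.1.insert m (i + 1)
    match st.2.2 with
    | top :: rest => if top = doll then (ptr', st.2.1 + 2, rest) else (ptr', st.2.1, doll :: top :: rest)
    | [] => (ptr', st.2.1, [doll])
  else st

def pvBFold (cols : PySem.Dict Int (List Int)) (moves : List Int)
    (st : PySem.Dict Int Int × Int × List Int) : PySem.Dict Int Int × Int × List Int :=
  moves.foldl (pvBStep cols) st

def solution_alt (board : List (List Int)) (moves : List Int) : Int :=
  let cols := pvBuildCols board moves
  let ptr0 := cols.keys.foldl (fun (d : PySem.Dict Int Int) k => d.insert k 0) PySem.Dict.empty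
  (pvBFold cols moves (ptr0, 0, [])).2.1

-- ===== PRECONDITION & SPEC =====
-- Pre_ excludes inputs where some move's column index is invalid for some row: there Python A
-- raises IndexError as soon as its lazy scan reaches such a row (and B, which scans every row
-- of a referenced column up front, raises too); on ragged boards A may return before reaching
-- the bad row while B's preprocessing reaches it, so those inputs are excluded as well.
def Pre_solution (board : List (List Int)) (moves : List Int) : Prop :=
  ∀ m ∈ moves, ∀ row ∈ board, PySem.Raise.InRange row.length (m - 1)
instance (board : List (List Int)) (moves : List Int) : Decidable (Pre_solution board moves) := by
  unfold Pre_solution; infer_instance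
def pvWitness_solution : List (List Int) × List Int := ([[0, 3], [5, 3]], [2, 2, 1])
def Spec_solution (board : List (List Int)) (moves : List Int) (out : Int) : Prop := out = solution_alt board moves
instance (board : List (List Int)) (moves : List Int) (out : Int) : Decidable (Spec_solution board moves out) := by unfold Spec_solution; infer_instance

-- ===== CLAIM (what is proved, stated in full; the proofs are below) =====
def Claim_equal_solution : Prop := ∀ (board : List (List Int)) (moves : List Int), Dom_solution board moves → Pre_solution board moves → Spec_solution board moves (solution board moves)

-- ===== LEMMAS AND PROOFS =====

-- nonzero entries of column c over a row list (pvColOf board m = pvNz (m-1) board)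
def pvNz (c : Int) (rows : List (List Int)) : List Int :=
  rows.filterMap (fun row =>
    match PySem.List.pyGet? row c with
    | some v => if v ≠ 0 then some v else none
    | none => none)

lemma pvColOf_eq_nz (board : List (List Int)) (m : Int) :
    pvColOf board m = pvNz (m - 1) board := rfl

-- the accumulator of pvAFold only collects appended dolls
lemma pvAFold_acc (board : List (List Int)) :
    ∀ (moves : List Int) (h : PySem.Dict Int Int) (acc : List Int),
      pvAFold board moves (h, acc)
        = ((pvAFold board moves (h, [])).1, acc ++ (pvAFold board moves (h, [])).2) := by
  intro moves
  induction moves with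
  | nil => intro h acc; simp [pvAFold]
  | cons m ms ih =>
    intro h acc
    have hstep : ∀ acc' : List Int,
        pvAFold board (m :: ms) (h, acc')
          = pvAFold board ms
            (match pvScan board (m - 1)
                (PySem.List.pyRange (h.getD (m - 1) 0) (board.length : Int) 1) with
              | none => (h, acc')
              | some (r1, v) => (h.insert (m - 1) r1, acc' ++ [v])) := fun _ => rfl
    rw [hstep acc, hstep []]
    cases hs : pvScan board (m - 1)
        (PySem.List.pyRange (h.getD (m - 1) 0) (board.length : Int) 1) with
    | none => exact ih h acc
    | some p =>
      obtain ⟨r1, v⟩ := p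
      simp only
      rw [ih (h.insert (m - 1) r1) (acc ++ [v]), ih (h.insert (m - 1) r1) ([] ++ [v])]
      simp

-- a fold inserting 0 at every key leaves every getD-default-0 lookup at 0
lemma getD_fold_insert_zero (f : Int → Int) :
    ∀ (l : List Int) (d : PySem.Dict Int Int) (k : Int),
      d.getD k 0 = 0 →
      (l.foldl (fun d x => d.insert (f x) 0) d).getD k 0 = 0 := by
  intro l
  induction l with
  | nil => intro d k hk; simpa using hk
  | cons x xs ih =>
    intro d k hk
    simp only [List.foldl_cons]
    apply ih
    rw [PySem.Dict.getD_insert]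
    split <;> simp [hk]

-- same for the identity key function (B's ptr initialisation)
lemma getD_fold_insert_zero' :
    ∀ (l : List Int) (d : PySem.Dict Int Int) (k : Int),
      d.getD k 0 = 0 →
      (l.foldl (fun d x => d.insert x 0) d).getD k 0 = 0 := by
  intro l
  induction l with
  | nil => intro d k hk; simpa using hk
  | cons x xs ih =>
    intro d k hk
    simp only [List.foldl_cons]
    apply ih
    rw [PySem.Dict.getD_insert]
    split <;> simp [hk]

-- a fold that never touches key m leaves its getD unchanged
lemma getD_fold_insert_nomem (f : Int → List Int) :
    ∀ (l : List Int) (d : PySem.Dict Int (List Int)) (m : Int), m ∉ l →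
      (l.foldl (fun d k => d.insert k (f k)) d).getD m [] = d.getD m [] := by
  intro l
  induction l with
  | nil => intro d m _; rfl
  | cons y ys ih =>
    intro d m hm
    simp only [List.mem_cons, not_or] at hm
    simp only [List.foldl_cons]
    rw [ih _ m hm.2, PySem.Dict.getD_insert, if_neg hm.1]

-- a fold inserting f k at key k: any member key reads back f
lemma getD_fold_insert_fun (f : Int → List Int) :
    ∀ (l : List Int) (d : PySem.Dict Int (List Int)) (m : Int), m ∈ l →
      (l.foldl (fun d k => d.insert k (f k)) d).getD m [] = f m := by
  intro l
  induction l with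
  | nil => intro d m hm; cases hm
  | cons x xs ih =>
    intro d m hm
    simp only [List.foldl_cons]
    by_cases hx : m ∈ xs
    · exact ih _ m hx
    · have hmx : m = x := by
        rcases List.mem_cons.mp hm with h | h
        · exact h
        · exact absurd h hx
      subst hmx
      rw [getD_fold_insert_nomem f xs _ m hx, PySem.Dict.getD_insert, if_pos rfl]

-- pvScan from row h computes the head of the nonzero column list of the dropped board
lemma pvScan_spec (board : List (List Int)) (c : Int)
    (hv : ∀ row ∈ board, (PySem.List.pyGet? row c).isSome) :
    ∀ (n h : Nat), board.length - h ≤ n → h ≤ board.length →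
      (pvNz c (board.drop h) = [] ∧
        pvScan board c (PySem.List.pyRange (h : Int) (board.length : Int) 1) = none) ∨
      (∃ (h' : Nat) (v : Int), h < h' ∧ h' ≤ board.length ∧
        pvScan board c (PySem.List.pyRange (h : Int) (board.length : Int) 1)
          = some ((h' : Int), v) ∧
        pvNz c (board.drop h) = v :: pvNz c (board.drop h')) := by
  intro n
  induction n with
  | zero =>
    intro h hn hle
    have hh : h = board.length := by omega
    subst hh
    left
    refine ⟨by simp [pvNz], ?_⟩
    rw [PySem.List.pyRange_one_eq_nil (le_refl _)]
    rfl
  | succ n ih =>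
    intro h hn hle
    by_cases hlt : h < board.length
    · have hcast : (h : Int) < (board.length : Int) := by exact_mod_cast hlt
      rw [PySem.List.pyRange_one_cons hcast]
      have hget : PySem.List.pyGet? board (h : Int) = some board[h] := by
        simp [List.getElem?_eq_getElem hlt]
      have hrow := hv board[h] (List.getElem_mem hlt)
      obtain ⟨v, hvv⟩ := Option.isSome_iff_exists.mp hrow
      have hdrop : board.drop h = board[h] :: board.drop (h + 1) :=
        List.drop_eq_getElem_cons hlt
      by_cases hv0 : v = 0
      · subst hv0
        have hrec : pvScan board c ((h : Int) :: PySem.List.pyRange ((h : Int) + 1) (board.length : Int) 1)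
            = pvScan board c (PySem.List.pyRange ((h : Int) + 1) (board.length : Int) 1) := by
          simp [pvScan, hget, hvv]
        have hnzeq : pvNz c (board.drop h) = pvNz c (board.drop (h + 1)) := by
          rw [hdrop]; simp [pvNz, hvv]
        have hcast1 : ((h : Int) + 1) = ((h + 1 : Nat) : Int) := by push_cast; ring
        rw [hrec, hcast1, hnzeq]
        rcases ih (h + 1) (by omega) (by omega) with ⟨a, b⟩ | ⟨h', v', h1, h2, h3, h4⟩
        · exact Or.inl ⟨a, b⟩
        · exact Or.inr ⟨h', v', by omega, h2, h3, h4⟩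
      · right
        refine ⟨h + 1, v, by omega, by omega, ?_, ?_⟩
        · have hc1 : ((h + 1 : Nat) : Int) = (h : Int) + 1 := by push_cast; ring
          rw [hc1]
          simp [pvScan, hget, hvv, hv0]
        · rw [hdrop]
          simp [pvNz, hvv, hv0]
    · have hh : h = board.length := by omega
      subst hh
      left
      refine ⟨by simp [pvNz], ?_⟩
      rw [PySem.List.pyRange_one_eq_nil (le_refl _)]
      rfl

-- B's inline stack logic is pvStackStep
lemma bstack (ans : Int) (stack : List Int) (doll : Int) (ptr' : PySem.Dict Int Int) :
    (match stack with
      | top :: rest => if top = doll then (ptr', ans + 2, rest) else (ptr', ans, doll :: top :: rest)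
      | [] => (ptr', ans, [doll]))
    = (ptr', (pvStackStep (ans, stack) doll).1, (pvStackStep (ans, stack) doll).2) := by
  cases stack with
  | nil => rfl
  | cons t r => simp only [pvStackStep]; split <;> rfl

-- main simulation: A's generator + consumer equals B's interleaved loop under the pointer invariant
lemma pv_main (board : List (List Int)) (cols : PySem.Dict Int (List Int)) :
    ∀ (moves : List Int) (hash ptr : PySem.Dict Int Int) (ans : Int) (stack : List Int),
      (∀ m ∈ moves, ∀ row ∈ board, PySem.Raise.InRange row.length (m - 1)) →
      (∀ m ∈ moves,
        cols.getD m [] = pvNz (m - 1) board ∧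
        ∃ h : Nat, h ≤ board.length ∧ hash.getD (m - 1) 0 = (h : Int) ∧
        ∃ p : Nat, ptr.getD m 0 = (p : Int) ∧
          pvNz (m - 1) (board.drop h) = (pvNz (m - 1) board).drop p) →
      (pvAFold board moves (hash, [])).2.foldl pvStackStep (ans, stack)
        = ((pvBFold cols moves (ptr, ans, stack)).2.1, (pvBFold cols moves (ptr, ans, stack)).2.2) := by
  intro moves
  induction moves with
  | nil => intro hash ptr ans stack _ _; simp [pvAFold, pvBFold]
  | cons m ms ih =>
    intro hash ptr ans stack hPre hInv
    obtain ⟨hcols, h, hle, hhash, p, hptr, hdropnz⟩ := hInv m (by simp)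
    have hv : ∀ row ∈ board, (PySem.List.pyGet? row (m - 1)).isSome := by
      intro row hrow
      have hin := hPre m (by simp) row hrow
      rw [Option.isSome_iff_ne_none]
      intro hnone
      exact ((PySem.List.pyGet?_eq_none_iff row (m - 1)).mp hnone) hin
    have hA : pvAFold board (m :: ms) (hash, ([] : List Int))
        = pvAFold board ms
          (match pvScan board (m - 1)
              (PySem.List.pyRange (hash.getD (m - 1) 0) (board.length : Int) 1) with
            | none => (hash, ([] : List Int))
            | some (r1, v) => (hash.insert (m - 1) r1, [] ++ [v])) := rfl
    have hB : pvBFold cols (m :: ms) (ptr, ans, stack)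
        = pvBFold cols ms (pvBStep cols (ptr, ans, stack) m) := rfl
    have hPre' : ∀ m' ∈ ms, ∀ row ∈ board, PySem.Raise.InRange row.length (m' - 1) :=
      fun m' hm' => hPre m' (by simp [hm'])
    rcases pvScan_spec board (m - 1) hv (board.length - h) h (le_refl _) hle with
      ⟨hnil, hscan⟩ | ⟨h', v, hh', hle', hscan, hconsnz⟩
    · -- column exhausted: neither side picks a doll
      have hlenle : (pvNz (m - 1) board).length ≤ p := by
        have h1 : (pvNz (m - 1) board).drop p = [] := by rw [← hdropnz, hnil]
        have h2 := List.length_drop (i := p) (l := pvNz (m - 1) board)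
        rw [h1] at h2
        simp at h2
        omega
      have hbstep : pvBStep cols (ptr, ans, stack) m = (ptr, ans, stack) := by
        simp only [pvBStep, hcols, hptr]
        rw [if_neg (by omega)]
      rw [hA, hB, hhash, hscan, hbstep]
      exact ih hash ptr ans stack hPre' (fun m' hm' => hInv m' (by simp [hm']))
    · -- a doll v is picked from the column
      have hdp : (pvNz (m - 1) board).drop p = v :: pvNz (m - 1) (board.drop h') := by
        rw [← hdropnz, hconsnz]
      have hplen : p < (pvNz (m - 1) board).length := by
        have h2 := List.length_drop (i := p) (l := pvNz (m - 1) board)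
        rw [hdp] at h2
        simp at h2
        omega
      have hdg := List.drop_eq_getElem_cons hplen
      rw [hdg] at hdp
      have hgetp : (pvNz (m - 1) board)[p] = v := (List.cons.injEq _ _ _ _ ▸ hdp).1
      have hdropp1 : (pvNz (m - 1) board).drop (p + 1) = pvNz (m - 1) (board.drop h') :=
        (List.cons.injEq _ _ _ _ ▸ hdp).2
      have hbstep : pvBStep cols (ptr, ans, stack) m
          = (ptr.insert m ((p : Int) + 1),
             (pvStackStep (ans, stack) v).1, (pvStackStep (ans, stack) v).2) := by
        simp only [pvBStep, hcols, hptr]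
        rw [if_pos (by omega)]
        have hdoll : PySem.List.pyGetD (pvNz (m - 1) board) ((p : Nat) : Int) 0 = v := by
          rw [PySem.List.pyGetD_natCast, List.getD_eq_getElem _ _ hplen, hgetp]
        rw [hdoll]
        exact bstack ans stack v _
      rw [hA, hB, hhash, hscan, hbstep]
      simp only [List.nil_append]
      rw [pvAFold_acc board ms (hash.insert (m - 1) ((h' : Nat) : Int)) [v]]
      simp only [List.singleton_append, List.foldl_cons]
      have hstep := ih (hash.insert (m - 1) ((h' : Nat) : Int)) (ptr.insert m ((p : Int) + 1))
        (pvStackStep (ans, stack) v).1 (pvStackStep (ans, stack) v).2 hPre' ?_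
      · exact hstep
      · intro m' hm'
        obtain ⟨hc', h0, hle0, hh0, p0, hp0, hd0⟩ := hInv m' (by simp [hm'])
        refine ⟨hc', ?_⟩
        by_cases hmm : m' = m
        · subst hmm
          refine ⟨h', hle', ?_, p + 1, ?_, ?_⟩
          · rw [PySem.Dict.getD_insert, if_pos rfl]
          · rw [PySem.Dict.getD_insert, if_pos rfl]; push_cast; ring
          · rw [← hdropp1]
        · have hne1 : m' - 1 ≠ m - 1 := fun hc => hmm (by omega)
          refine ⟨h0, hle0, ?_, p0, ?_, hd0⟩
          · rw [PySem.Dict.getD_insert, if_neg hne1]; exact hh0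
          · rw [PySem.Dict.getD_insert, if_neg hmm]; exact hp0

-- ===== VERDICT (by name: the statement is the Claim_ definition above) =====
theorem solution_spec : Claim_equal_solution := by
  intro board moves _ hpre
  unfold Spec_solution
  unfold solution solution_alt pvGetDoll
  have hmain := pv_main board (pvBuildCols board moves) moves
    (moves.foldl (fun d mov => d.insert (mov - 1) 0) PySem.Dict.empty)
    ((pvBuildCols board moves).keys.foldl (fun (d : PySem.Dict Int Int) k => d.insert k 0) PySem.Dict.empty)
    0 [] hpre ?_
  · rw [hmain]
  · intro m hm
    refine ⟨?_, 0, by omega, ?_, 0, ?_, by simp⟩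
    · unfold pvBuildCols
      rw [getD_fold_insert_fun (pvColOf board) (PySem.List.dedup moves) PySem.Dict.empty m
        (by rw [PySem.List.mem_dedup]; exact hm)]
      exact pvColOf_eq_nz board m
    · exact getD_fold_insert_zero (fun x => x - 1) moves PySem.Dict.empty (m - 1) (by simp)
    · exact getD_fold_insert_zero' _ PySem.Dict.empty m (by simp)
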